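-- pv_equiv track=rewrite | github.com/Sebysemily/Flu | code/02_Beast/observe_subset_alignment_qc.py | run_count
-- ===== SOURCE A (Python) =====
-- def run_count(seq, char):
--     runs = 0
--     in_run = False
--     for base in seq:
--         if base == char:
--             if not in_run:
--                 runs += 1
--                 in_run = True
--         else:
--             in_run = False
--     return runs
-- ===== SOURCE B (Python) =====
-- def run_count(seq, char):
--     mask = [base == char for base in seq]
--     return sum(1 for cur, prev in zip(mask, [False] + mask) if cur and not prev)
-- ===== Notes on version B (the rewrite author's own statement) =====
-- stated objective: alternative
-- what changed: Replaces the stateful in_run flag loop with a two-phase pipeline: build the boolean match mask, then count run starts by zipping the mask with itself shifted by one (cur and not prev).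
import Mathlib
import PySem

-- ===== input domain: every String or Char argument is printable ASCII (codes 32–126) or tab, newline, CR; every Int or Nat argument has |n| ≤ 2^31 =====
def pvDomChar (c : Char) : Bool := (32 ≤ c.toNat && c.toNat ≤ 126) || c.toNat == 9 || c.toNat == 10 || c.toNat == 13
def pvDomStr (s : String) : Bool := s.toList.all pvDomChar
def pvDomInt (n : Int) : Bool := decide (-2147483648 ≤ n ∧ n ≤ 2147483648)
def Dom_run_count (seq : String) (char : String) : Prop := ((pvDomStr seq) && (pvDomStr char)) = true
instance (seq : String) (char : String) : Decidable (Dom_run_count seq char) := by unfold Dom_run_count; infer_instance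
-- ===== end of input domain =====

-- B replaces A's stateful in_run flag loop by a two-phase pipeline: build the boolean
-- match mask, then count run starts via zip of the mask with its shift (cur && !prev).


-- ===== PORT A =====
-- literal port: fold over the characters with state (runs, in_run)
def run_count (seq : String) (char : String) : Int :=
  (seq.toList.foldl
    (fun (st : Int × Bool) (base : Char) =>
      if String.ofList [base] == char then
        if !st.2 then (st.1 + 1, true) else (st.1, true)
      else (st.1, false))
    (0, false)).1

-- ===== PORT B =====
-- literal port of Source B: mask, then count pairs (cur, prev) with cur && !prev
def run_count_alt (seq : String) (char : String) : Int :=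
  let mask := seq.toList.map (fun base => String.ofList [base] == char)
  Int.ofNat ((mask.zip (false :: mask)).countP (fun p => p.1 && !p.2))

-- ===== PRECONDITION & SPEC =====
def Spec_run_count (seq : String) (char : String) (out : Int) : Prop := out = run_count_alt seq char
instance (seq : String) (char : String) (out : Int) : Decidable (Spec_run_count seq char out) := by unfold Spec_run_count; infer_instance

-- ===== CLAIM (what is proved, stated in full; the proofs are below) =====
def Claim_equal_run_count : Prop := ∀ (seq : String) (char : String), Dom_run_count seq char → Spec_run_count seq char (run_count seq char)

-- ===== LEMMAS AND PROOFS =====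

-- abstract run counter over the boolean mask, carrying the previous value
def gRuns : List Bool → Bool → Nat
  | [], _ => 0
  | b :: t, prev => (if b && !prev then 1 else 0) + gRuns t b

theorem foldA_eq_gRuns (char : String) (cs : List Char) (r : Int) (flag : Bool) :
    (cs.foldl
      (fun (st : Int × Bool) (base : Char) =>
        if String.ofList [base] == char then
          if !st.2 then (st.1 + 1, true) else (st.1, true)
        else (st.1, false))
      (r, flag)).1
    = r + gRuns (cs.map (fun base => String.ofList [base] == char)) flag := by
  induction cs generalizing r flag with
  | nil => simp [gRuns]
  | cons c t ih =>
    simp only [List.foldl_cons, List.map_cons, gRuns]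
    by_cases h : String.ofList [c] == char
    · cases flag <;> simp only [h, Bool.not_true, Bool.not_false, if_true, if_false,
        Bool.and_true, Bool.and_false, Bool.true_and] <;> rw [ih] <;> push_cast <;> ring
    · simp only [h, Bool.and_false, if_false, Bool.false_and]
      rw [ih]; push_cast; ring

theorem countP_zip_eq_gRuns (bs : List Bool) (prev : Bool) :
    ((bs.zip (prev :: bs)).countP (fun p => p.1 && !p.2)) = gRuns bs prev := by
  induction bs generalizing prev with
  | nil => simp [gRuns]
  | cons b t ih =>
    simp [List.zip, gRuns, List.countP_cons, ← ih b]
    cases b <;> cases prev <;> simp <;> omega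

-- ===== VERDICT (by name: the statement is the Claim_ definition above) =====
theorem run_count_spec : Claim_equal_run_count := by
  intro seq char _
  unfold Spec_run_count run_count run_count_alt
  rw [foldA_eq_gRuns, ← countP_zip_eq_gRuns]
  simp
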